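-- pv_equiv track=rewrite | github.com/archananfs/Vacations | vacation.py | get_iteration_list
-- ===== SOURCE A (Python) =====
-- def get_iteration_list(holiday_date_list, Number_of_holidays):
--     iteration_list = []
--     for i in range(0, (len(holiday_date_list))):
--         total = 0
--         iterations = 1
--         for j in range(i, (len(holiday_date_list))):
--             total = total + holiday_date_list[j][1]
--             if total < Number_of_holidays:
--                 iterations = iterations + 1
--             else:
--                 break
--         iteration_list.append([holiday_date_list[i][0], iterations])
--
--     return iteration_list
-- ===== SOURCE B (Python) =====
-- def get_iteration_list(holiday_date_list, Number_of_holidays):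
--     # Sliding window: since day-counts are nonnegative, the break point is
--     # nondecreasing in the start index, so one pointer sweeps the list once.
--     n = len(holiday_date_list)
--     result = []
--     j = 0
--     total = 0  # sum of holiday_date_list[i:j][1]
--     for i in range(n):
--         if j < i:
--             j = i
--             total = 0
--         while j < n and total + holiday_date_list[j][1] < Number_of_holidays:
--             total += holiday_date_list[j][1]
--             j += 1
--         result.append([holiday_date_list[i][0], 1 + j - i])
--         if i < j:
--             total -= holiday_date_list[i][1]
--     return result
-- ===== Notes on version B (the rewrite author's own statement) =====
-- stated objective: alternative
-- what changed: Replaces the per-start rescan (for each i, re-sum from i until the threshold is hit) by a single sliding-window sweep: one pointer j and a running window sum advance monotonically, so each element is added and removed at most once (intended as faster, O(n) worst case vs O(n^2); a timing run measured ~2x at the largest size but not consistently).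
-- outside the precondition, e.g. on get_iteration_list([[1, -3], [2, 5]], 4): A returns [[1, 3], [2, 1]], B returns [[1, 3], [2, 2]]
import Mathlib
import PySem

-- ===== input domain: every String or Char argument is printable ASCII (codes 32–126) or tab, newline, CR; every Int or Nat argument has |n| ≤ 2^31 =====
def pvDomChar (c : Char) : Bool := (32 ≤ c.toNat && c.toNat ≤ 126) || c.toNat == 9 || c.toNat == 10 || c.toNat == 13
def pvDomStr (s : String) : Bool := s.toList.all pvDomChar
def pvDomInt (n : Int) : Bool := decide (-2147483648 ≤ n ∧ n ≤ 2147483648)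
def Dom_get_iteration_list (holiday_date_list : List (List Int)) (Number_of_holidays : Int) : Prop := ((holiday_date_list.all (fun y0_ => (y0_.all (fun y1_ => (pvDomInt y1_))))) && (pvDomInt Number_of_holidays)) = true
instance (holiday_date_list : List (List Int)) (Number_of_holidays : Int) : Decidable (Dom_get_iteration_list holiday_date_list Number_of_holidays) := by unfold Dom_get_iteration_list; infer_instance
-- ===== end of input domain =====

-- B replaces A's per-start rescan by a single sliding-window sweep (one pointer, each element added
-- and removed from the window sum at most once); exact on rows of length ≥ 2 with nonnegative day-counts (Pre_).


-- shared accessors: holiday_date_list[i][0] / holiday_date_list[j][1]; under Pre_ the indexes are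
-- in range (outer index always is, inner needs row length ≥ 2), so getD is exact there.
def pvKey (l : List (List Int)) (i : Nat) : Int := (l.getD i []).getD 0 0
def pvVal (l : List (List Int)) (j : Nat) : Int := (l.getD j []).getD 1 0

-- ===== PORT A =====
-- inner 'for j in range(i, n): total += l[j][1]; if total < N: iterations += 1 else: break'
def pvInnerA (l : List (List Int)) (N : Int) : List Int → Int → Int → Int
  | [], _, iters => iters
  | j :: js, total, iters =>
    let t := total + pvVal l j.toNat
    if t < N then pvInnerA l N js t (iters + 1) else iters

def get_iteration_list (holiday_date_list : List (List Int)) (Number_of_holidays : Int) : List (List Int) :=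
  (PySem.List.pyRange 0 (holiday_date_list.length : Int) 1).foldl
    (fun acc i =>
      acc ++ [[pvKey holiday_date_list i.toNat,
               pvInnerA holiday_date_list Number_of_holidays
                 (PySem.List.pyRange i (holiday_date_list.length : Int) 1) 0 1]]) []

-- ===== PORT B =====
-- the 'while j < n and total + l[j][1] < N' loop
def pvAdvance (l : List (List Int)) (N : Int) (j : Nat) (total : Int) : Nat × Int :=
  if h : j < l.length then
    if total + pvVal l j < N then pvAdvance l N (j + 1) (total + pvVal l j) else (j, total)
  else (j, total)
termination_by l.length - j

-- the 'for i in range(n)' loop, state (j, total, result)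
def pvBLoop (l : List (List Int)) (N : Int) : List Int → Nat → Int → List (List Int) → List (List Int)
  | [], _, _, res => res
  | i :: is, j, total, res =>
    let i' := i.toNat
    let p := if j < i' then (i', (0 : Int)) else (j, total)
    let q := pvAdvance l N p.1 p.2
    let res' := res ++ [[pvKey l i', 1 + (q.1 : Int) - i]]
    let total' := if i' < q.1 then q.2 - pvVal l i' else q.2
    pvBLoop l N is q.1 total' res'

def get_iteration_list_alt (holiday_date_list : List (List Int)) (Number_of_holidays : Int) : List (List Int) :=
  pvBLoop holiday_date_list Number_of_holidays
    (PySem.List.pyRange 0 (holiday_date_list.length : Int) 1) 0 0 []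

-- ===== PRECONDITION & SPEC =====
-- rows shorter than 2 make A raise IndexError; Pre_ additionally excludes rows whose day-count
-- l[j][1] is negative, on which A still returns: B's sliding window needs monotone prefix sums,
-- and negative holiday durations are outside the function's purpose (see claim cites).
def Pre_get_iteration_list (holiday_date_list : List (List Int)) (Number_of_holidays : Int) : Prop :=
  ∀ r ∈ holiday_date_list, 2 ≤ r.length ∧ 0 ≤ r.getD 1 0
instance (holiday_date_list : List (List Int)) (Number_of_holidays : Int) : Decidable (Pre_get_iteration_list holiday_date_list Number_of_holidays) := by unfold Pre_get_iteration_list; infer_instance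

def pvWitness_get_iteration_list : List (List Int) × Int := ([[1, 2], [3, 0], [7, 4]], 5)

def Spec_get_iteration_list (holiday_date_list : List (List Int)) (Number_of_holidays : Int) (out : List (List Int)) : Prop := out = get_iteration_list_alt holiday_date_list Number_of_holidays
instance (holiday_date_list : List (List Int)) (Number_of_holidays : Int) (out : List (List Int)) : Decidable (Spec_get_iteration_list holiday_date_list Number_of_holidays out) := by unfold Spec_get_iteration_list; infer_instance

-- ===== CLAIM (what is proved, stated in full; the proofs are below) =====
def Claim_equal_get_iteration_list : Prop := ∀ (holiday_date_list : List (List Int)) (Number_of_holidays : Int), Dom_get_iteration_list holiday_date_list Number_of_holidays → Pre_get_iteration_list holiday_date_list Number_of_holidays → Spec_get_iteration_list holiday_date_list Number_of_holidays (get_iteration_list holiday_date_list Number_of_holidays)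

-- ===== LEMMAS AND PROOFS =====

-- window sum l[i:j][1]
def pvS (l : List (List Int)) (i j : Nat) : Int := ∑ k ∈ Finset.Ico i j, pvVal l k

theorem pvS_self (l : List (List Int)) (i : Nat) : pvS l i i = 0 := by
  simp [pvS]

theorem pvS_succ_top (l : List (List Int)) {i j : Nat} (h : i ≤ j) :
    pvS l i (j + 1) = pvS l i j + pvVal l j := by
  simp [pvS, Finset.sum_Ico_succ_top h]

theorem pvS_succ_bot (l : List (List Int)) {i m : Nat} (h : i < m) :
    pvS l (i + 1) m = pvS l i m - pvVal l i := by
  have := Finset.sum_eq_sum_Ico_succ_bot h (fun k => pvVal l k)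
  simp [pvS]; omega

theorem pvVal_nonneg {l : List (List Int)} {N : Int}
    (hpre : Pre_get_iteration_list l N) {i : Nat} (hi : i < l.length) : 0 ≤ pvVal l i := by
  have hmem : l.getD i [] ∈ l := by
    rw [List.getD_eq_getElem l [] hi]; exact List.getElem_mem hi
  exact (hpre _ hmem).2

theorem pvAdvance_ge (l : List (List Int)) (N : Int) (j : Nat) (t : Int) :
    j ≤ (pvAdvance l N j t).1 := by
  fun_induction pvAdvance l N j t with
  | case1 j t h ht ih => omega
  | case2 j t h ht => simp
  | case3 j t h => simp

-- A's inner loop counts exactly the steps pvAdvance takes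
theorem pvInnerA_eq_advance (l : List (List Int)) (N : Int) :
    ∀ (j : Nat) (t iters : Int),
      pvInnerA l N (PySem.List.pyRange (j : Int) (l.length : Int) 1) t iters
        = iters + (((pvAdvance l N j t).1 - j : Nat) : Int) := by
  intro j
  induction hfuel : l.length - j using Nat.strong_induction_on generalizing j with
  | _ fuel ih =>
  intro t iters
  by_cases h : j < l.length
  · rw [PySem.List.pyRange_one_cons (by exact_mod_cast h)]
    rw [pvInnerA]
    simp only [Int.toNat_natCast]
    rw [pvAdvance]
    by_cases hlt : t + pvVal l j < N
    · simp only [hlt, if_pos, dif_pos h]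
      have hcast : ((j : Int) + 1) = (((j + 1 : Nat)) : Int) := by push_cast; ring
      rw [hcast, ih (l.length - (j + 1)) (by omega) (j + 1) rfl]
      have hge : j + 1 ≤ (pvAdvance l N (j + 1) (t + pvVal l j)).1 := pvAdvance_ge l N _ _
      omega
    · simp only [hlt, dif_pos h, if_false]
      simp
  · rw [PySem.List.pyRange_one_eq_nil (by exact_mod_cast Nat.le_of_not_lt h)]
    rw [pvInnerA, pvAdvance]
    simp [h]

-- post-conditions of the while loop, relative to window start i
theorem pvAdvance_spec (l : List (List Int)) (N : Int) (i : Nat) :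
    ∀ (j : Nat) (t : Int), i ≤ j → j ≤ l.length → t = pvS l i j →
      (∀ k, i ≤ k → k < j → pvS l i (k + 1) < N) →
      i ≤ (pvAdvance l N j t).1 ∧ (pvAdvance l N j t).1 ≤ l.length ∧
      (pvAdvance l N j t).2 = pvS l i (pvAdvance l N j t).1 ∧
      (∀ k, i ≤ k → k < (pvAdvance l N j t).1 → pvS l i (k + 1) < N) := by
  intro j
  induction hfuel : l.length - j using Nat.strong_induction_on generalizing j with
  | _ fuel ih =>
  intro t hij hjl ht hinv
  rw [pvAdvance]
  by_cases h : j < l.length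
  · by_cases hlt : t + pvVal l j < N
    · simp only [dif_pos h, if_pos hlt]
      refine ih (l.length - (j + 1)) (by omega) (j + 1) rfl (t + pvVal l j) (by omega) (by omega) ?_ ?_
      · rw [ht, pvS_succ_top l hij]
      · intro k hk1 hk2
        rcases Nat.lt_or_ge k j with hk | hk
        · exact hinv k hk1 hk
        · have : k = j := by omega
          subst this
          rw [pvS_succ_top l hij, ← ht]; exact hlt
    · simp only [dif_pos h, if_neg hlt]
      exact ⟨hij, hjl, ht, hinv⟩
  · simp only [dif_neg h]
    exact ⟨hij, hjl, ht, hinv⟩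

-- the while loop restarted from i with an empty window lands in the same place
theorem pvAdvance_resume (l : List (List Int)) (N : Int) (i : Nat) (j : Nat)
    (hij : i ≤ j) (hjl : j ≤ l.length)
    (hinv : ∀ k, i ≤ k → k < j → pvS l i (k + 1) < N) :
    ∀ (m : Nat), i ≤ m → m ≤ j →
      pvAdvance l N m (pvS l i m) = pvAdvance l N j (pvS l i j) := by
  intro m
  induction hfuel : j - m using Nat.strong_induction_on generalizing m with
  | _ fuel ih =>
  intro him hmj
  rcases Nat.eq_or_lt_of_le hmj with he | hmj'
  · subst he; rfl
  · rw [pvAdvance]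
    have hm : m < l.length := by omega
    have hcond : pvS l i m + pvVal l m < N := by
      rw [← pvS_succ_top l him]; exact hinv m him hmj'
    simp only [dif_pos hm, if_pos hcond]
    rw [← pvS_succ_top l him]
    exact ih (j - (m + 1)) (by omega) (m + 1) rfl (by omega) (by omega)

-- main simulation: B's fold equals A's fold from any invariant-respecting state
theorem pvBLoop_eq_fold (l : List (List Int)) (N : Int)
    (hpre : Pre_get_iteration_list l N) :
    ∀ (i : Nat), i ≤ l.length → ∀ (j : Nat) (t : Int) (res : List (List Int)),
      (j < i ∨ (i ≤ j ∧ j ≤ l.length ∧ t = pvS l i j ∧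
        ∀ k, i ≤ k → k < j → pvS l i (k + 1) < N)) →
      pvBLoop l N (PySem.List.pyRange (i : Int) (l.length : Int) 1) j t res
        = (PySem.List.pyRange (i : Int) (l.length : Int) 1).foldl
            (fun acc x => acc ++ [[pvKey l x.toNat,
              pvInnerA l N (PySem.List.pyRange x (l.length : Int) 1) 0 1]]) res := by
  intro i
  induction hfuel : l.length - i using Nat.strong_induction_on generalizing i with
  | _ fuel ih
  intro hil j t res hstate
  rcases Nat.eq_or_lt_of_le hil with he | hlt
  · rw [PySem.List.pyRange_one_eq_nil (by exact_mod_cast he.ge)]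
    rfl
  · rw [PySem.List.pyRange_one_cons (by exact_mod_cast hlt)]
    rw [pvBLoop, List.foldl_cons]
    simp only [Int.toNat_natCast]
    -- the normalized (post-reset) window state
    set p := if j < i then (i, (0 : Int)) else (j, t) with hp
    have hpfacts : i ≤ p.1 ∧ p.1 ≤ l.length ∧ p.2 = pvS l i p.1 ∧
        ∀ k, i ≤ k → k < p.1 → pvS l i (k + 1) < N := by
      rcases hstate with hjlt | ⟨h1, h2, h3, h4⟩
      · rw [hp, if_pos hjlt]
        exact ⟨le_refl i, le_of_lt hlt, (pvS_self l i).symm, by omega⟩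
      · rw [hp, if_neg (by omega)]
        exact ⟨h1, h2, h3, h4⟩
    obtain ⟨hp1, hp2, hp3, hp4⟩ := hpfacts
    have hresume : pvAdvance l N i 0 = pvAdvance l N p.1 p.2 := by
      rw [hp3]
      have h0 : (0 : Int) = pvS l i i := (pvS_self l i).symm
      calc pvAdvance l N i 0 = pvAdvance l N i (pvS l i i) := by rw [← h0]
        _ = pvAdvance l N p.1 (pvS l i p.1) :=
            pvAdvance_resume l N i p.1 hp1 hp2 hp4 i (le_refl i) hp1
    set q := pvAdvance l N p.1 p.2 with hq
    obtain ⟨hq1, hq2, hq3, hq4⟩ := pvAdvance_spec l N i p.1 p.2 hp1 hp2 hp3 hp4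
    rw [← hq] at hq1 hq2 hq3 hq4
    -- the appended rows agree
    have hval : pvInnerA l N (PySem.List.pyRange (i : Int) (l.length : Int) 1) 0 1
        = 1 + (q.1 : Int) - (i : Int) := by
      rw [pvInnerA_eq_advance l N i 0 1, hresume]
      omega
    rw [hval]
    -- continue with the next start index
    have hcast : ((i : Int) + 1) = (((i + 1 : Nat)) : Int) := by push_cast; ring
    rw [hcast]
    apply ih (l.length - (i + 1)) (by omega) (i + 1) rfl (by omega)
    by_cases hiq : i < q.1
    · right
      refine ⟨by omega, by omega, ?_, ?_⟩
      · rw [if_pos hiq, hq3, pvS_succ_bot l hiq]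
      · intro k hk1 hk2
        have hvi : 0 ≤ pvVal l i := pvVal_nonneg hpre hlt
        have := hq4 k (by omega) hk2
        rw [pvS_succ_bot l (show i < k + 1 by omega)]
        omega
    · left; omega

-- ===== VERDICT (by name: the statement is the Claim_ definition above) =====
theorem get_iteration_list_spec : Claim_equal_get_iteration_list := by
  intro l N _ hpre
  unfold Spec_get_iteration_list get_iteration_list get_iteration_list_alt
  exact (pvBLoop_eq_fold l N hpre 0 (Nat.zero_le _) 0 0 []
    (Or.inr ⟨le_refl 0, Nat.zero_le _, (pvS_self l 0).symm, by omega⟩)).symm
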